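-- pv_equiv track=rewrite | github.com/Mvitimin/Python_algorithm | Greedy/4-keys-keyboard.py | maxA
-- ===== SOURCE A (Python) =====
-- def maxA(n: int) -> int:
-- 	if n <= 3:
-- 		return n
-- 	dp = [0] * (n + 1)
-- 	dp[1], dp[2], dp[3] = 1, 2, 3
-- 	for i in range(4, n + 1):
-- 		dp[i] = max([dp[i - 1] + 1] + [dp[i - j] * (j - 1) for j in range(3, i)])
-- 	return dp[n]
-- ===== SOURCE B (Python) =====
-- def maxA(n: int) -> int:
--     if n <= 6:
--         return n
--     v1, v2, v3, v4, v5 = 2, 3, 4, 5, 6  # dp[i-5..i-1] rolling window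
--     for _ in range(7, n + 1):
--         v1, v2, v3, v4, v5 = v2, v3, v4, v5, max(v5 + 1, 2 * v3, 3 * v2, 4 * v1)
--     return v5
-- ===== Notes on version B (the rewrite author's own statement) =====
-- stated objective: faster
-- what changed: replaces the quadratic DP that rescans every possible paste length with a linear-time, constant-memory rolling-window DP that keeps only the last five dp values (longer pastes are never optimal)
import Mathlib
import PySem

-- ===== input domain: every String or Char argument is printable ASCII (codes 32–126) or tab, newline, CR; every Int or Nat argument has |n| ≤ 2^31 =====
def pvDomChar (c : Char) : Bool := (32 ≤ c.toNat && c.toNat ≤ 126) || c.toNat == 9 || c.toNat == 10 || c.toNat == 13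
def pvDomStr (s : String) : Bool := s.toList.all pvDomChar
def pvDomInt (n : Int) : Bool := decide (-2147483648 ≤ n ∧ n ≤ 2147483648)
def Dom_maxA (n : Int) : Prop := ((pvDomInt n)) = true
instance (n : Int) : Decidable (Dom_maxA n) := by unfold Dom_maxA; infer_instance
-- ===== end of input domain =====

-- B replaces A's quadratic DP, which rescans every possible paste length, by a linear-time,
-- constant-memory rolling-window DP keeping only the last five dp values (measured faster).

-- ===== PORT A =====
-- max([x] + xs) of Python: nonempty-list max with explicit head
def pyMaxList (x : Int) (xs : List Int) : Int := xs.foldl max x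

-- one iteration of A's loop body: dp[i] = max([dp[i-1]+1] + [dp[i-j]*(j-1) for j in range(3,i)])
def adpBody (dp : List Int) (i : Nat) : List Int :=
  dp.set i (pyMaxList (dp.getD (i - 1) 0 + 1)
    ((List.range' 3 (i - 3)).map (fun j => dp.getD (i - j) 0 * ((j : Int) - 1))))

-- dp = [0]*(n+1); dp[1], dp[2], dp[3] = 1, 2, 3
def adp0 (N : Nat) : List Int := (((List.replicate (N + 1) (0 : Int)).set 1 1).set 2 2).set 3 3

def maxA (n : Int) : Int :=
  if n ≤ 3 then n
  else ((List.range' 4 (n.toNat - 3)).foldl adpBody (adp0 n.toNat)).getD n.toNat 0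

-- ===== PORT B =====
-- one iteration of B's loop: shift the window (v1,v2,v3,v4,v5) = dp[i-5..i-1]
def bstep (s : Int × Int × Int × Int × Int) : Int × Int × Int × Int × Int :=
  (s.2.1, s.2.2.1, s.2.2.2.1, s.2.2.2.2,
   max (max (max (s.2.2.2.2 + 1) (2 * s.2.2.1)) (3 * s.2.1)) (4 * s.1))

def maxA_alt (n : Int) : Int :=
  if n ≤ 6 then n
  else ((List.range' 7 (n.toNat - 6)).foldl (fun s _ => bstep s) (2, 3, 4, 5, 6)).2.2.2.2

-- ===== PRECONDITION & SPEC =====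
def Spec_maxA (n : Int) (out : Int) : Prop := out = maxA_alt n
instance (n : Int) (out : Int) : Decidable (Spec_maxA n out) := by unfold Spec_maxA; infer_instance

-- ===== CLAIM (what is proved, stated in full; the proofs are below) =====
def Claim_equal_maxA : Prop := ∀ (n : Int), Dom_maxA n → Spec_maxA n (maxA n)

-- ===== LEMMAS AND PROOFS =====

-- reference value table for A's dp: ftab k = [dp k, dp (k-1), …, dp 0]
def ftabStep (t : List Int) (i : Nat) : Int :=
  ((List.range' 3 (i - 3)).map (fun j => t.getD (j - 1) 0 * ((j : Int) - 1))).foldl max (t.headI + 1)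

def ftab : Nat → List Int
  | 0 => [0]
  | n + 1 => (if n + 1 ≤ 3 then ((n : Int) + 1) else ftabStep (ftab n) (n + 1)) :: ftab n

def f (k : Nat) : Int := (ftab k).headI

-- reference value for B's window
def gwin : Nat → Int × Int × Int × Int × Int
  | 0 => (2, 3, 4, 5, 6)
  | m + 1 => bstep (gwin m)

def g (k : Nat) : Int := if k ≤ 6 then (k : Int) else (gwin (k - 6)).2.2.2.2

-- foldl-max toolkit
theorem le_foldl_max_init (b : Int) (l : List Int) : b ≤ l.foldl max b := by
  induction l generalizing b with
  | nil => exact le_refl b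
  | cons x xs ih => exact le_trans (le_max_left b x) (ih (max b x))

theorem le_foldl_max_mem {a : Int} {l : List Int} (h : a ∈ l) (b : Int) : a ≤ l.foldl max b := by
  induction l generalizing b with
  | nil => cases h
  | cons x xs ih =>
    rcases List.mem_cons.mp h with rfl | h'
    · exact le_trans (le_max_right b a) (le_foldl_max_init _ xs)
    · exact ih h' (max b x)

theorem foldl_max_le {b c : Int} {l : List Int} (hb : b ≤ c) (h : ∀ a ∈ l, a ≤ c) :
    l.foldl max b ≤ c := by
  induction l generalizing b with
  | nil => exact hb
  | cons x xs ih =>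
    exact ih (max_le hb (h x (List.mem_cons_self))) (fun a ha => h a (List.mem_cons_of_mem _ ha))

-- ftab indexing
theorem ftab_getD : ∀ (k m : Nat), m ≤ k → (ftab k).getD m 0 = f (k - m) := by
  intro k
  induction k with
  | zero => intro m hm; interval_cases m; rfl
  | succ n ih =>
    intro m hm
    cases m with
    | zero => rfl
    | succ s =>
      have hs : s ≤ n := by omega
      have : (ftab (n + 1)).getD (s + 1) 0 = (ftab n).getD s 0 := rfl
      rw [this, ih s hs]
      congr 1
      omega

theorem f_rec (n : Nat) :
    f (n + 4) =
      ((List.range' 3 (n + 1)).map (fun j => f (n + 4 - j) * ((j : Int) - 1))).foldl max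
        (f (n + 3) + 1) := by
  have h1 : f (n + 4) = ftabStep (ftab (n + 3)) (n + 4) := by
    show (ftab (n + 4)).headI = _
    rw [show ftab (n + 4) = (if n + 3 + 1 ≤ 3 then ((n + 3 : Nat) : Int) + 1 else
        ftabStep (ftab (n + 3)) (n + 3 + 1)) :: ftab (n + 3) from rfl]
    rw [if_neg (by omega : ¬ n + 3 + 1 ≤ 3)]
    show ftabStep (ftab (n + 3)) (n + 3 + 1) = ftabStep (ftab (n + 3)) (n + 4)
    rw [show n + 3 + 1 = n + 4 from by omega]
  rw [h1]
  unfold ftabStep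
  have hr : n + 4 - 3 = n + 1 := by omega
  rw [hr]
  have hh : (ftab (n + 3)).headI = f (n + 3) := rfl
  rw [hh]
  congr 1
  apply List.map_congr_left
  intro j hj
  rcases List.mem_range'_1.mp hj with ⟨h3, hlt⟩
  rw [ftab_getD (n + 3) (j - 1) (by omega)]
  congr 2
  omega

theorem g_small (c : Nat) (hc : c ≤ 6) : g c = (c : Int) := by
  unfold g; rw [if_pos hc]

theorem g_unfold_hi (m : Nat) : g (m + 7) = (bstep (gwin m)).2.2.2.2 := by
  unfold g
  rw [if_neg (by omega : ¬ m + 7 ≤ 6), show m + 7 - 6 = m + 1 from by omega]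
  rfl

theorem gwin_eq : ∀ m : Nat, gwin m = (g (m + 2), g (m + 3), g (m + 4), g (m + 5), g (m + 6)) := by
  intro m
  induction m with
  | zero => decide
  | succ m ih =>
    have h7 := g_unfold_hi m
    rw [ih] at h7
    show bstep (gwin m) = _
    rw [ih]
    have e : (g (m + 1 + 2), g (m + 1 + 3), g (m + 1 + 4), g (m + 1 + 5), g (m + 1 + 6)) =
        (g (m + 3), g (m + 4), g (m + 5), g (m + 6), g (m + 7)) := by
      rw [show m + 1 + 2 = m + 3 from by omega, show m + 1 + 3 = m + 4 from by omega,
        show m + 1 + 4 = m + 5 from by omega, show m + 1 + 5 = m + 6 from by omega,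
        show m + 1 + 6 = m + 7 from by omega]
    rw [e, h7]
    rfl

theorem g_rec (m : Nat) :
    g (m + 7) =
      max (max (max (g (m + 6) + 1) (2 * g (m + 4))) (3 * g (m + 3))) (4 * g (m + 2)) := by
  rw [g_unfold_hi m, gwin_eq m]
  rfl

theorem g_term1 (m : Nat) : g (m + 6) + 1 ≤ g (m + 7) := by
  rw [g_rec]
  exact le_trans (le_trans (le_max_left _ _) (le_max_left _ _)) (le_max_left _ _)

theorem g_term3 (m : Nat) : 2 * g (m + 4) ≤ g (m + 7) := by
  rw [g_rec]
  exact le_trans (le_trans (le_max_right _ _) (le_max_left _ _)) (le_max_left _ _)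

theorem g_term4 (m : Nat) : 3 * g (m + 3) ≤ g (m + 7) := by
  rw [g_rec]
  exact le_trans (le_max_right _ _) (le_max_left _ _)

theorem g_term5 (m : Nat) : 4 * g (m + 2) ≤ g (m + 7) := by
  rw [g_rec]
  exact le_max_right _ _

theorem g_succ (k : Nat) : g k + 1 ≤ g (k + 1) := by
  by_cases h : k ≤ 5
  · rw [g_small k (by omega), g_small (k + 1) (by omega)]
    push_cast
    omega
  · obtain ⟨m, rfl⟩ : ∃ m, k = m + 6 := ⟨k - 6, by omega⟩
    have := g_term1 m
    rwa [show m + 7 = m + 6 + 1 from by omega] at this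

theorem g_ge (k : Nat) : (k : Int) ≤ g k := by
  induction k with
  | zero => rw [g_small 0 (by omega)]
  | succ k ih =>
    have := g_succ k
    push_cast
    push_cast at ih
    linarith

theorem g_nonneg (k : Nat) : 0 ≤ g k := le_trans (by positivity) (g_ge k)

-- linear lower bound  g m ≥ 3m - 12
theorem g_lin (m : Nat) : 3 * (m : Int) ≤ g m + 12 := by
  induction m using Nat.strong_induction_on with
  | _ m ih =>
    by_cases h : m ≤ 12
    · interval_cases m <;> decide
    · obtain ⟨c, rfl⟩ : ∃ c, m = c + 13 := ⟨m - 13, by omega⟩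
      have h1 := g_term4 (c + 6)
      rw [show c + 6 + 3 = c + 9 from by omega, show c + 6 + 7 = c + 13 from by omega] at h1
      have h2 := ih (c + 9) (by omega)
      push_cast
      push_cast at h2
      linarith [Int.natCast_nonneg c]

-- upper growth:  g(m+7) ≤ (3/2)·g(m+6)
theorem g_ratio_up (m : Nat) : 2 * g (m + 7) ≤ 3 * g (m + 6) := by
  induction m using Nat.strong_induction_on with
  | _ m ih =>
    by_cases h : m ≤ 9
    · interval_cases m <;> decide
    · obtain ⟨c, rfl⟩ : ∃ c, m = c + 10 := ⟨m - 10, by omega⟩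
      have hg := g_rec (c + 10)
      rw [show c + 10 + 7 = c + 17 from by omega, show c + 10 + 6 = c + 16 from by omega,
        show c + 10 + 4 = c + 14 from by omega, show c + 10 + 3 = c + 13 from by omega,
        show c + 10 + 2 = c + 12 from by omega] at hg
      rw [show c + 10 + 7 = c + 17 from by omega, show c + 10 + 6 = c + 16 from by omega, hg]
      have t3 := g_term3 (c + 9)
      rw [show c + 9 + 4 = c + 13 from by omega, show c + 9 + 7 = c + 16 from by omega] at t3
      have t4 := g_term4 (c + 9)
      rw [show c + 9 + 3 = c + 12 from by omega, show c + 9 + 7 = c + 16 from by omega] at t4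
      rcases max_choice (max (max (g (c + 16) + 1) (2 * g (c + 14))) (3 * g (c + 13)))
          (4 * g (c + 12)) with h3 | h3 <;> rw [h3]
      · rcases max_choice (max (g (c + 16) + 1) (2 * g (c + 14))) (3 * g (c + 13))
            with h2 | h2 <;> rw [h2]
        · rcases max_choice (g (c + 16) + 1) (2 * g (c + 14)) with h1 | h1 <;> rw [h1]
          · have := g_ge (c + 16)
            push_cast at this
            linarith [Int.natCast_nonneg c]
          · have hih := ih (c + 7) (by omega)
            rw [show c + 7 + 7 = c + 14 from by omega, show c + 7 + 6 = c + 13 from by omega] at hih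
            linarith
        · linarith
      · linarith [g_nonneg (c + 12)]

-- lower growth:  g(m+7) ≥ (5/4)·g(m+6)
theorem g_ratio_lo (m : Nat) : 5 * g (m + 6) ≤ 4 * g (m + 7) := by
  induction m using Nat.strong_induction_on with
  | _ m ih =>
    by_cases h : m ≤ 9
    · interval_cases m <;> decide
    · obtain ⟨c, rfl⟩ : ∃ c, m = c + 10 := ⟨m - 10, by omega⟩
      rw [show c + 10 + 6 = c + 16 from by omega, show c + 10 + 7 = c + 17 from by omega]
      have hg := g_rec (c + 9)
      rw [show c + 9 + 7 = c + 16 from by omega, show c + 9 + 6 = c + 15 from by omega,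
        show c + 9 + 4 = c + 13 from by omega, show c + 9 + 3 = c + 12 from by omega,
        show c + 9 + 2 = c + 11 from by omega] at hg
      rw [hg]
      have t4 := g_term4 (c + 10)
      rw [show c + 10 + 3 = c + 13 from by omega, show c + 10 + 7 = c + 17 from by omega] at t4
      have t5 := g_term5 (c + 10)
      rw [show c + 10 + 2 = c + 12 from by omega, show c + 10 + 7 = c + 17 from by omega] at t5
      rcases max_choice (max (max (g (c + 15) + 1) (2 * g (c + 13))) (3 * g (c + 12)))
          (4 * g (c + 11)) with h3 | h3 <;> rw [h3]
      · rcases max_choice (max (g (c + 15) + 1) (2 * g (c + 13))) (3 * g (c + 12))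
            with h2 | h2 <;> rw [h2]
        · rcases max_choice (g (c + 15) + 1) (2 * g (c + 13)) with h1 | h1 <;> rw [h1]
          · have r1 := g_ratio_up (c + 8)
            rw [show c + 8 + 7 = c + 15 from by omega, show c + 8 + 6 = c + 14 from by omega] at r1
            have r2 := g_ratio_up (c + 7)
            rw [show c + 7 + 7 = c + 14 from by omega, show c + 7 + 6 = c + 13 from by omega] at r2
            have hge := g_ge (c + 13)
            push_cast at hge
            linarith [Int.natCast_nonneg c]
          · have r0 := g_ratio_up (c + 6)
            rw [show c + 6 + 7 = c + 13 from by omega, show c + 6 + 6 = c + 12 from by omega] at r0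
            linarith [g_nonneg (c + 12)]
        · linarith [g_nonneg (c + 12)]
      · have hih := ih (c + 5) (by omega)
        rw [show c + 5 + 6 = c + 11 from by omega, show c + 5 + 7 = c + 12 from by omega] at hih
        linarith [g_nonneg (c + 12)]

-- paste lengths j ≥ 6 are dominated by j = 5
theorem g_chain (t c : Nat) : g (c + 6) * ((t : Int) + 5) ≤ 4 * g (c + t + 7) := by
  induction t generalizing c with
  | zero =>
    have := g_ratio_lo c
    push_cast
    rw [show c + 0 + 7 = c + 7 from by omega]
    linarith
  | succ t ih =>
    have hq := g_ratio_lo c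
    have hnn := g_nonneg (c + 6)
    have htn : (0 : Int) ≤ (t : Int) := Int.natCast_nonneg t
    have step : g (c + 6) * ((t : Int) + 1 + 5) ≤ g (c + 7) * ((t : Int) + 5) := by
      nlinarith [mul_le_mul_of_nonneg_left hq (by linarith : (0 : Int) ≤ (t : Int) + 5),
        mul_nonneg (by linarith : (0 : Int) ≤ (t : Int) + 1) hnn]
    have hih := ih (c + 1)
    rw [show c + 1 + 6 = c + 7 from by omega, show c + 1 + t + 7 = c + (t + 1) + 7 from by omega] at hih
    push_cast
    push_cast at step hih
    linarith

theorem fg_base : ∀ k < 16, f k = g k := by decide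

theorem fg (k : Nat) : f k = g k := by
  induction k using Nat.strong_induction_on with
  | _ k ih =>
    by_cases hk : k < 16
    · exact fg_base k hk
    · obtain ⟨p, rfl⟩ : ∃ p, k = p + 16 := ⟨k - 16, by omega⟩
      have hrec := f_rec (p + 12)
      simp only [show p + 12 + 4 = p + 16 from by omega, show p + 12 + 3 = p + 15 from by omega,
        show p + 12 + 1 = p + 13 from by omega] at hrec
      rw [hrec, ih (p + 15) (by omega)]
      have hmap : (List.range' 3 (p + 13)).map (fun j => f (p + 16 - j) * ((j : Int) - 1)) =
          (List.range' 3 (p + 13)).map (fun j => g (p + 16 - j) * ((j : Int) - 1)) := by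
        apply List.map_congr_left
        intro j hj
        rcases List.mem_range'_1.mp hj with ⟨h3, _⟩
        rw [ih (p + 16 - j) (by omega)]
      rw [hmap]
      have hg := g_rec (p + 9)
      rw [show p + 9 + 7 = p + 16 from by omega, show p + 9 + 6 = p + 15 from by omega,
        show p + 9 + 4 = p + 13 from by omega, show p + 9 + 3 = p + 12 from by omega,
        show p + 9 + 2 = p + 11 from by omega] at hg
      rw [hg]
      apply le_antisymm
      · apply foldl_max_le
        · exact le_trans (le_trans (le_max_left _ _) (le_max_left _ _)) (le_max_left _ _)
        · intro a ha
          rcases List.mem_map.mp ha with ⟨j, hj, rfl⟩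
          rcases List.mem_range'_1.mp hj with ⟨h3, hl⟩
          have hlt : j < p + 16 := by omega
          rcases (by omega : j = 3 ∨ j = 4 ∨ j = 5 ∨ (6 ≤ j ∧ j ≤ p + 10) ∨ p + 11 ≤ j)
            with rfl | rfl | rfl | ⟨h6, hle⟩ | hbig
          · rw [show p + 16 - 3 = p + 13 from by omega,
              show g (p + 13) * (((3 : Nat) : Int) - 1) = 2 * g (p + 13) from by push_cast; ring]
            exact le_trans (le_trans (le_max_right _ _) (le_max_left _ _)) (le_max_left _ _)
          · rw [show p + 16 - 4 = p + 12 from by omega,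
              show g (p + 12) * (((4 : Nat) : Int) - 1) = 3 * g (p + 12) from by push_cast; ring]
            exact le_trans (le_max_right _ _) (le_max_left _ _)
          · rw [show p + 16 - 5 = p + 11 from by omega,
              show g (p + 11) * (((5 : Nat) : Int) - 1) = 4 * g (p + 11) from by push_cast; ring]
            exact le_max_right _ _
          · obtain ⟨t, rfl⟩ : ∃ t, j = t + 6 := ⟨j - 6, by omega⟩
            rw [show p + 16 - (t + 6) = (p + 4 - t) + 6 from by omega,
              show (((t + 6 : Nat)) : Int) - 1 = (t : Int) + 5 from by push_cast; ring]
            have hch := g_chain t (p + 4 - t)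
            rw [show p + 4 - t + t + 7 = p + 11 from by omega] at hch
            exact le_trans hch (le_max_right _ _)
          · rw [g_small (p + 16 - j) (by omega)]
            have hj1 : ((p + 16 - j : Nat) : Int) ≤ 5 := by omega
            have hj2 : (j : Int) - 1 ≤ (p : Int) + 14 := by omega
            have hj0 : (0 : Int) ≤ (j : Int) - 1 := by omega
            have hj5 : (0 : Int) ≤ ((p + 16 - j : Nat) : Int) := Int.natCast_nonneg _
            have hA : ((p + 16 - j : Nat) : Int) * ((j : Int) - 1) ≤ 5 * ((p : Int) + 14) := by
              nlinarith
            have hL := g_lin (p + 11)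
            push_cast at hL
            have hB : 5 * ((p : Int) + 14) ≤ 4 * g (p + 11) := by
              linarith [Int.natCast_nonneg p]
            exact le_trans (le_trans hA hB) (le_max_right _ _)
      · apply max_le
        · apply max_le
          · apply max_le
            · exact le_foldl_max_init _ _
            · have hmem : (3 : Nat) ∈ List.range' 3 (p + 13) := List.mem_range'_1.mpr ⟨le_refl 3, by omega⟩
              have heq : g (p + 16 - 3) * (((3 : Nat) : Int) - 1) = 2 * g (p + 13) := by
                rw [show p + 16 - 3 = p + 13 from by omega]; push_cast; ring
              have hmm : 2 * g (p + 13) ∈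
                  (List.range' 3 (p + 13)).map (fun j => g (p + 16 - j) * ((j : Int) - 1)) :=
                List.mem_map.mpr ⟨3, hmem, heq⟩
              exact le_foldl_max_mem hmm _
          · have hmem : (4 : Nat) ∈ List.range' 3 (p + 13) := List.mem_range'_1.mpr ⟨by omega, by omega⟩
            have heq : g (p + 16 - 4) * (((4 : Nat) : Int) - 1) = 3 * g (p + 12) := by
              rw [show p + 16 - 4 = p + 12 from by omega]; push_cast; ring
            have hmm : 3 * g (p + 12) ∈
                (List.range' 3 (p + 13)).map (fun j => g (p + 16 - j) * ((j : Int) - 1)) :=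
              List.mem_map.mpr ⟨4, hmem, heq⟩
            exact le_foldl_max_mem hmm _
        · have hmem : (5 : Nat) ∈ List.range' 3 (p + 13) := List.mem_range'_1.mpr ⟨by omega, by omega⟩
          have heq : g (p + 16 - 5) * (((5 : Nat) : Int) - 1) = 4 * g (p + 11) := by
            rw [show p + 16 - 5 = p + 11 from by omega]; push_cast; ring
          have hmm : 4 * g (p + 11) ∈
              (List.range' 3 (p + 13)).map (fun j => g (p + 16 - j) * ((j : Int) - 1)) :=
            List.mem_map.mpr ⟨5, hmem, heq⟩
          exact le_foldl_max_mem hmm _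

-- bridge A
theorem getD_set_self (l : List Int) (i : Nat) (a : Int) (h : i < l.length) :
    (l.set i a).getD i 0 = a := by
  simp [List.getD_eq_getElem?_getD, h]

theorem getD_set_ne (l : List Int) (i k : Nat) (a : Int) (h : k ≠ i) :
    (l.set i a).getD k 0 = l.getD k 0 := by
  simp [List.getD_eq_getElem?_getD, List.getElem?_set_ne (Ne.symm h)]

theorem adp_length (N m : Nat) : ((List.range' 4 m).foldl adpBody (adp0 N)).length = N + 1 := by
  induction m with
  | zero => simp [adp0]
  | succ m ih =>
    rw [show List.range' 4 (m + 1) = List.range' 4 m ++ [4 + m] from by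
      simpa using (List.range'_concat (s := 4) (n := m) (step := 1))]
    rw [List.foldl_append]
    show (adpBody _ (4 + m)).length = N + 1
    unfold adpBody
    rw [List.length_set]
    exact ih

theorem adp0_getD (N k : Nat) (h3 : 3 ≤ N) (hk : k < 4) : (adp0 N).getD k 0 = f k := by
  interval_cases k
  · unfold adp0
    rw [getD_set_ne _ _ _ _ (by omega), getD_set_ne _ _ _ _ (by omega),
      getD_set_ne _ _ _ _ (by omega)]
    simp [List.getD_eq_getElem?_getD]
    rfl
  · unfold adp0
    rw [getD_set_ne _ _ _ _ (by omega), getD_set_ne _ _ _ _ (by omega),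
      getD_set_self _ _ _ (by simp; omega)]
    rfl
  · unfold adp0
    rw [getD_set_ne _ _ _ _ (by omega), getD_set_self _ _ _ (by simp; omega)]
    rfl
  · unfold adp0
    rw [getD_set_self _ _ _ (by simp; omega)]
    rfl

theorem adp_inv (N : Nat) (hN : 4 ≤ N) :
    ∀ m, m ≤ N - 3 → ∀ k, k < 4 + m →
      ((List.range' 4 m).foldl adpBody (adp0 N)).getD k 0 = f k := by
  intro m
  induction m with
  | zero =>
    intro _ k hk
    exact adp0_getD N k (by omega) (by omega)
  | succ m ih =>
    intro hm k hk
    rw [show List.range' 4 (m + 1) = List.range' 4 m ++ [4 + m] from by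
      simpa using (List.range'_concat (s := 4) (n := m) (step := 1))]
    rw [List.foldl_append]
    show (adpBody ((List.range' 4 m).foldl adpBody (adp0 N)) (4 + m)).getD k 0 = f k
    have hlen : ((List.range' 4 m).foldl adpBody (adp0 N)).length = N + 1 := adp_length N m
    have hm' : m ≤ N - 3 := by omega
    by_cases hkm : k = 4 + m
    · subst hkm
      show (((List.range' 4 m).foldl adpBody (adp0 N)).set (4 + m)
          (pyMaxList (((List.range' 4 m).foldl adpBody (adp0 N)).getD (4 + m - 1) 0 + 1)
            ((List.range' 3 (4 + m - 3)).map
              (fun j => ((List.range' 4 m).foldl adpBody (adp0 N)).getD (4 + m - j) 0 *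
                ((j : Int) - 1))))).getD (4 + m) 0 = f (4 + m)
      rw [getD_set_self _ _ _ (by rw [hlen]; omega)]
      rw [show (4 : Nat) + m - 1 = m + 3 from by omega, show (4 : Nat) + m - 3 = m + 1 from by omega]
      rw [ih hm' (m + 3) (by omega)]
      have hmap : (List.range' 3 (m + 1)).map
            (fun j => ((List.range' 4 m).foldl adpBody (adp0 N)).getD (4 + m - j) 0 * ((j : Int) - 1)) =
          (List.range' 3 (m + 1)).map (fun j => f (4 + m - j) * ((j : Int) - 1)) := by
        apply List.map_congr_left
        intro j hj
        rcases List.mem_range'_1.mp hj with ⟨ha, hb⟩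
        rw [ih hm' (4 + m - j) (by omega)]
      rw [hmap]
      unfold pyMaxList
      simp only [show (4 : Nat) + m = m + 4 from by omega]
      exact (f_rec m).symm
    · show (((List.range' 4 m).foldl adpBody (adp0 N)).set (4 + m)
          (pyMaxList (((List.range' 4 m).foldl adpBody (adp0 N)).getD (4 + m - 1) 0 + 1)
            ((List.range' 3 (4 + m - 3)).map
              (fun j => ((List.range' 4 m).foldl adpBody (adp0 N)).getD (4 + m - j) 0 *
                ((j : Int) - 1))))).getD k 0 = f k
      rw [getD_set_ne _ _ _ _ hkm]
      exact ih hm' k (by omega)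

theorem maxA_eq_f (n : Int) (h : ¬ n ≤ 3) : maxA n = f n.toNat := by
  unfold maxA
  rw [if_neg h]
  exact adp_inv n.toNat (by omega) (n.toNat - 3) (le_refl _) n.toNat (by omega)

-- bridge B
theorem bwin_inv : ∀ m : Nat,
    (List.range' 7 m).foldl (fun s _ => bstep s) (2, 3, 4, 5, 6) = gwin m := by
  intro m
  induction m with
  | zero => rfl
  | succ m ih =>
    rw [show List.range' 7 (m + 1) = List.range' 7 m ++ [7 + m] by
      simpa using (List.range'_concat (s := 7) (n := m) (step := 1))]
    rw [List.foldl_append, ih]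
    rfl

theorem maxA_alt_eq_g (n : Int) (h : ¬ n ≤ 6) : maxA_alt n = g n.toNat := by
  unfold maxA_alt
  rw [if_neg h, bwin_inv]
  unfold g
  rw [if_neg (by omega)]

-- ===== VERDICT (by name: the statement is the Claim_ definition above) =====
theorem maxA_spec : Claim_equal_maxA := by
  intro n _
  unfold Spec_maxA
  by_cases h3 : n ≤ 3
  · unfold maxA maxA_alt
    rw [if_pos h3, if_pos (by omega)]
  · by_cases h6 : n ≤ 6
    · rw [maxA_eq_f n h3, fg]
      unfold maxA_alt
      rw [if_pos h6, g_small _ (by omega)]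
      omega
    · rw [maxA_eq_f n h3, maxA_alt_eq_g n h6, fg]
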